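-- pv_equiv track=rewrite | github.com/yplueckebaum/Data-Visualization-Group-5-2021 | titleprocessor.py | did_use_parenthesis_or_square_brackets
-- ===== SOURCE A (Python) =====
-- def did_use_parenthesis_or_square_brackets(title):
--     found_parenthesis_pair = False
--     found_square_brackets_pair = False
--
--     for index in range(0, len(title)):
--         if found_parenthesis_pair or found_square_brackets_pair:
--             break;
--         if title[index] == "(":
--             for new_index in range(index+1, len(title)):
--                 if title[new_index] == ")":
--                     found_parenthesis_pair = True;
--                     break;
--         if title[index] == "[":
--             for new_index in range(index + 1, len(title)):
--                 if title[new_index] == "]":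
--                     found_square_brackets_pair = True;
--                     break;
--     return found_parenthesis_pair or found_square_brackets_pair;
-- ===== SOURCE B (Python) =====
-- def did_use_parenthesis_or_square_brackets(title):
--     seen_paren = False
--     seen_bracket = False
--     for ch in title:
--         if ch == ")" and seen_paren:
--             return True
--         if ch == "]" and seen_bracket:
--             return True
--         if ch == "(":
--             seen_paren = True
--         elif ch == "[":
--             seen_bracket = True
--     return False
-- ===== Notes on version B (the rewrite author's own statement) =====
-- stated objective: faster
-- what changed: Replaced the index loop with a nested forward scan per opening bracket by a single pass that remembers whether an opening '('/'[' was seen and returns True on the first matching closer.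
import Mathlib
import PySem

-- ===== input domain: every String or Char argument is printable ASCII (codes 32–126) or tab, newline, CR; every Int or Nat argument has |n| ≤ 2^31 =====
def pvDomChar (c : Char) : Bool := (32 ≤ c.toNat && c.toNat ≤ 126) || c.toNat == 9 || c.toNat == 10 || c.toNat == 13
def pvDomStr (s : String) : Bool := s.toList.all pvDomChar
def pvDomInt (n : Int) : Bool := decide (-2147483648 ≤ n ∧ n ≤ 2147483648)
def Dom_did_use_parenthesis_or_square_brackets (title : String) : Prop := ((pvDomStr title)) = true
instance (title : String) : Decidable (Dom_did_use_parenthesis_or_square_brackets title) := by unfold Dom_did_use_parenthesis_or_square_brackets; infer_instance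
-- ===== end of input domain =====

-- B replaces A's nested forward scan per opening bracket by one pass with two 'seen opener' flags (objective: faster, single pass).

-- ===== PORT A =====
-- inner 'for new_index in range(index+1, len(title))' with break: scan the suffix for the closer
def pvScanFor (xs : List Char) (c : Char) : Bool :=
  match xs with
  | [] => false
  | x :: xs => if x == c then true else pvScanFor xs c

-- outer 'for index in range(0, len(title))' carrying both flags; break when a flag is set
def pvLoopA (xs : List Char) (fp fs : Bool) : Bool :=
  match xs with
  | [] => fp || fs
  | x :: rest =>
    if fp || fs then fp || fs
    else
      let fp := if x == '(' then (if pvScanFor rest ')' then true else fp) else fp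
      let fs := if x == '[' then (if pvScanFor rest ']' then true else fs) else fs
      pvLoopA rest fp fs

def did_use_parenthesis_or_square_brackets (title : String) : Bool :=
  pvLoopA title.toList false false

-- ===== PORT B =====
-- single pass over the characters, remembering whether '(' / '[' was seen
def pvLoopB (xs : List Char) (sp sb : Bool) : Bool :=
  match xs with
  | [] => false
  | x :: rest =>
    if x == ')' && sp then true
    else if x == ']' && sb then true
    else if x == '(' then pvLoopB rest true sb
    else if x == '[' then pvLoopB rest sp true
    else pvLoopB rest sp sb

def did_use_parenthesis_or_square_brackets_alt (title : String) : Bool :=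
  pvLoopB title.toList false false

-- ===== PRECONDITION & SPEC =====
def Spec_did_use_parenthesis_or_square_brackets (title : String) (out : Bool) : Prop := out = did_use_parenthesis_or_square_brackets_alt title
instance (title : String) (out : Bool) : Decidable (Spec_did_use_parenthesis_or_square_brackets title out) := by unfold Spec_did_use_parenthesis_or_square_brackets; infer_instance

-- ===== CLAIM (what is proved, stated in full; the proofs are below) =====
def Claim_equal_did_use_parenthesis_or_square_brackets : Prop := ∀ (title : String), Dom_did_use_parenthesis_or_square_brackets title → Spec_did_use_parenthesis_or_square_brackets title (did_use_parenthesis_or_square_brackets title)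

-- ===== LEMMAS AND PROOFS =====

-- A's loop with a flag already set returns at once
theorem pvLoopA_flags (xs : List Char) (fp fs : Bool) :
    pvLoopA xs fp fs = (fp || fs || pvLoopA xs false false) := by
  cases xs <;> cases fp <;> cases fs <;> simp [pvLoopA]

-- B's loop decomposes into 'closer anywhere ahead of a set flag' plus the flagless loop
theorem pvLoopB_decomp (xs : List Char) (sp sb : Bool) :
    pvLoopB xs sp sb = (sp && pvScanFor xs ')' || sb && pvScanFor xs ']' || pvLoopB xs false false) := by
  induction xs generalizing sp sb with
  | nil => simp [pvLoopB, pvScanFor]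
  | cons x rest ih =>
    by_cases h1 : x = ')' <;> by_cases h2 : x = ']' <;> by_cases h3 : x = '(' <;> by_cases h4 : x = '[' <;>
      cases sp <;> cases sb <;>
      simp_all [pvLoopB, pvScanFor] <;>
      (cases hp : pvScanFor rest ')' <;> cases hq : pvScanFor rest ']' <;>
        cases hr : pvLoopB rest false false <;> simp_all)

theorem pvLoop_eq (xs : List Char) : pvLoopA xs false false = pvLoopB xs false false := by
  induction xs with
  | nil => simp [pvLoopA, pvLoopB]
  | cons x rest ih =>
    have hA : pvLoopA (x :: rest) false false
        = pvLoopA rest ((x == '(') && pvScanFor rest ')') ((x == '[') && pvScanFor rest ']') := by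
      cases e3 : x == '(' <;> cases e4 : x == '[' <;> simp [pvLoopA, e3, e4]
    have hB : pvLoopB (x :: rest) false false = pvLoopB rest (x == '(') (x == '[') := by
      cases e1 : x == ')' <;> cases e2 : x == ']' <;> cases e3 : x == '(' <;> cases e4 : x == '[' <;>
        simp [pvLoopB, e1, e2, e3, e4] <;>
        (exfalso; simp only [beq_iff_eq] at e1 e2 e3 e4; subst_vars; simp_all)
    rw [hA, pvLoopA_flags, ih, hB, pvLoopB_decomp rest (x == '(') (x == '[')]

-- ===== VERDICT (by name: the statement is the Claim_ definition above) =====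
theorem did_use_parenthesis_or_square_brackets_spec : Claim_equal_did_use_parenthesis_or_square_brackets := by
  intro title _
  unfold Spec_did_use_parenthesis_or_square_brackets did_use_parenthesis_or_square_brackets did_use_parenthesis_or_square_brackets_alt
  exact pvLoop_eq _
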